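-- pv_equiv track=rewrite | github.com/eaobservatory/namakanui | src/namakanui/sim.py | other_bands
-- ===== SOURCE A (Python) =====
-- SIM_B3_FEMC    = 1<<0
--
-- SIM_B6_FEMC    = 1<<3
--
-- SIM_B7_FEMC    = 1<<6
--
-- SIM_FEMC       = 1<<15
--
-- def other_bands(band):
--     '''Return SIM_FEMC mask for other bands.'''
--     sim_femc_bits = {3:SIM_B3_FEMC, 6:SIM_B6_FEMC, 7:SIM_B7_FEMC}
--     if band in sim_femc_bits:
--         del sim_femc_bits[band]
--     else:
--         sim_femc_bits[0] = SIM_FEMC  # invalid band given, so sim FEMC too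
--     mask = 0
--     for b in sim_femc_bits.values():
--         mask |= b
--     return mask
-- ===== SOURCE B (Python) =====
-- SIM_B3_FEMC    = 1<<0
-- SIM_B6_FEMC    = 1<<3
-- SIM_B7_FEMC    = 1<<6
-- SIM_FEMC       = 1<<15
--
-- _BITS = {3: SIM_B3_FEMC, 6: SIM_B6_FEMC, 7: SIM_B7_FEMC}
-- _ALL = SIM_B3_FEMC | SIM_B6_FEMC | SIM_B7_FEMC
--
-- def other_bands(band):
--     '''Return SIM_FEMC mask for other bands.'''
--     if band in _BITS:
--         return _ALL ^ _BITS[band]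
--     return _ALL | SIM_FEMC
-- ===== Notes on version B (the rewrite author's own statement) =====
-- stated objective: simpler
-- what changed: Replaces the dict-deletion plus OR-accumulation loop with a closed-form full-mask XOR (disjoint bits) or full-mask OR SIM_FEMC for invalid bands.
import Mathlib
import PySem

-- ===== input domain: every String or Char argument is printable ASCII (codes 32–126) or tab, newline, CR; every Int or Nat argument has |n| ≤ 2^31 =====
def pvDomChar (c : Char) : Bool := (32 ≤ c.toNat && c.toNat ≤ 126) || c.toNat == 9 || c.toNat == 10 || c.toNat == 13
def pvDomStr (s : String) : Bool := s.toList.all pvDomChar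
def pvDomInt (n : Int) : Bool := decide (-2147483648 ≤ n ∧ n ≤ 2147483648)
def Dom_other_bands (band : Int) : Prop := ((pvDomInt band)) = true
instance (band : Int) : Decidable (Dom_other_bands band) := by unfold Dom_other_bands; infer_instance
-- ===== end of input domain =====

-- B replaces A's dict-deletion and OR-accumulation loop with a closed-form full-mask XOR / OR; objective: simpler.

-- ===== PORT A =====
-- constants from the module
def SIM_B3_FEMC : Int := 1 <<< 0
def SIM_B6_FEMC : Int := 1 <<< 3
def SIM_B7_FEMC : Int := 1 <<< 6
def SIM_FEMC : Int := 1 <<< 15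

def other_bands (band : Int) : Int :=
  let d : PySem.Dict Int Int :=
    PySem.Dict.ofList [(3, SIM_B3_FEMC), (6, SIM_B6_FEMC), (7, SIM_B7_FEMC)]
  let d := if d.contains band then d.erase band else d.insert 0 SIM_FEMC
  d.values.foldl (fun mask b => PySem.Int.bor mask b) 0

-- ===== PORT B =====
def simFemcBits : PySem.Dict Int Int :=
  PySem.Dict.ofList [(3, SIM_B3_FEMC), (6, SIM_B6_FEMC), (7, SIM_B7_FEMC)]
def allBits : Int := PySem.Int.bor (PySem.Int.bor SIM_B3_FEMC SIM_B6_FEMC) SIM_B7_FEMC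

def other_bands_alt (band : Int) : Int :=
  match simFemcBits.get? band with
  | some b => PySem.Int.bxor allBits b
  | none => PySem.Int.bor allBits SIM_FEMC

-- ===== PRECONDITION & SPEC =====
def Spec_other_bands (band : Int) (out : Int) : Prop := out = other_bands_alt band
instance (band : Int) (out : Int) : Decidable (Spec_other_bands band out) := by unfold Spec_other_bands; infer_instance

-- ===== CLAIM (what is proved, stated in full; the proofs are below) =====
def Claim_equal_other_bands : Prop := ∀ (band : Int), Dom_other_bands band → Spec_other_bands band (other_bands band)

-- ===== LEMMAS AND PROOFS =====

-- ===== VERDICT (by name: the statement is the Claim_ definition above) =====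
theorem other_bands_spec : Claim_equal_other_bands := by
  intro band _
  unfold Spec_other_bands other_bands other_bands_alt simFemcBits allBits
  by_cases h3 : band = 3
  · subst h3; decide
  · by_cases h6 : band = 6
    · subst h6; decide
    · by_cases h7 : band = 7
      · subst h7; decide
      · have h3' : ¬((3:Int) = band) := fun h => h3 h.symm
        have h6' : ¬((6:Int) = band) := fun h => h6 h.symm
        have h7' : ¬((7:Int) = band) := fun h => h7 h.symm
        simp [PySem.Dict.ofList, PySem.Dict.update, PySem.Dict.empty, PySem.Dict.contains,
              PySem.Dict.get?, PySem.Dict.erase, PySem.Dict.insert, PySem.Dict.values,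
              List.find?, beq_iff_eq, h3', h6', h7']
        rw [beq_eq_false_iff_ne.mpr h6', beq_eq_false_iff_ne.mpr h7']
        decide
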